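-- pv_equiv track=rewrite | github.com/dslwind/python-scripts | pdf_to_text/pdf_to_txt.py | remove_blank
-- ===== SOURCE A (Python) =====
-- def remove_blank(s):
--     t = ''
--     for i in s.split('\n'):
--         if i.strip():
--             i = ' '.join(i.split())
--             if i[0].islower():
--                 t = t + i
--             else:
--                 t = t + '\n' + i
--
--     return t.strip()
-- ===== SOURCE B (Python) =====
-- def remove_blank(s):
--     lines = [' '.join(i.split()) for i in s.split('\n') if i.strip()]
--     groups = []
--     for ln in lines:
--         if groups and ln[0].islower():
--             groups[-1].append(ln)
--         else:
--             groups.append([ln])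
--     return '\n'.join(''.join(g) for g in groups)
-- ===== Notes on version B (the rewrite author's own statement) =====
-- stated objective: alternative
-- what changed: Instead of threading one running string through the loop and fixing the leading newline with a final strip(), B first builds the list of normalized non-empty lines, folds them into explicit groups (a new group at every line whose first character is not a lowercase letter), and joins the groups with newlines; no trailing strip is needed.
import Mathlib
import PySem

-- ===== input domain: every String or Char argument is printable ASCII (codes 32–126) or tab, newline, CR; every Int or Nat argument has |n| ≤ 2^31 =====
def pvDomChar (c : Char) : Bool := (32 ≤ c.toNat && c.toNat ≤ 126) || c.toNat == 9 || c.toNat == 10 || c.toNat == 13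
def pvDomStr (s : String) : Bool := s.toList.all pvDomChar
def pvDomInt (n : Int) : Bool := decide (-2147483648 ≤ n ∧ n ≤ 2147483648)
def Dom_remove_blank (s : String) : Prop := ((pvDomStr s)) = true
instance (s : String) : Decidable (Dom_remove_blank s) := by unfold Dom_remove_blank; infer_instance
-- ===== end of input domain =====

-- B replaces A's single running string + final strip() by an explicit grouping pass
-- (normalized lines folded into groups, then joined); alternative decomposition, same cost.


-- ===== PORT A =====
def remove_blank (s : String) : String :=
  String.ofList (PySem.Chars.strip (
    (PySem.Chars.splitOn s.toList ['\n']).foldl (fun t i =>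
      if !(PySem.Chars.strip i).isEmpty then
        let i' := PySem.Chars.join [' '] (PySem.Chars.split₀ i)   -- ' '.join(i.split())
        match PySem.List.pyGet? i' 0 with                         -- i[0]
        | some c => if PySem.Chars.islower c then t ++ i' else t ++ '\n' :: i'
        | none => t   -- unreachable: i' ≠ [] because i.strip() is non-empty; Python never raises here
      else t) []))

-- ===== PORT B =====
def remove_blank_alt (s : String) : String :=
  let lines := ((PySem.Chars.splitOn s.toList ['\n']).filter
      (fun i => !(PySem.Chars.strip i).isEmpty)).map
      (fun i => PySem.Chars.join [' '] (PySem.Chars.split₀ i))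
  let groups := lines.foldl (fun gs ln =>
      if !gs.isEmpty && PySem.Chars.islower (ln.headD ' ') then   -- ln[0] (ln ≠ [], so headD is exact)
        gs.dropLast ++ [gs.getLastD [] ++ [ln]]                   -- groups[-1].append(ln)
      else gs ++ [[ln]]) ([] : List (List (List Char)))
  String.ofList (PySem.Chars.join ['\n'] (groups.map (fun g => PySem.Chars.join [] g)))

-- ===== PRECONDITION & SPEC =====
def Spec_remove_blank (s : String) (out : String) : Prop := out = remove_blank_alt s
instance (s : String) (out : String) : Decidable (Spec_remove_blank s out) := by unfold Spec_remove_blank; infer_instance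

-- ===== CLAIM (what is proved, stated in full; the proofs are below) =====
def Claim_equal_remove_blank : Prop := ∀ (s : String), Dom_remove_blank s → Spec_remove_blank s (remove_blank s)

-- ===== LEMMAS AND PROOFS =====

-- the normalized form of a kept line: ' '.join(i.split())
def pvNorm (i : List Char) : List Char := PySem.Chars.join [' '] (PySem.Chars.split₀ i)
-- what A appends to its running string for one kept line
def pvStuff (ln : List Char) : List Char :=
  if PySem.Chars.islower (ln.headD ' ') then ln else '\n' :: ln
-- B's group-building step
def pvStepB (gs : List (List (List Char))) (ln : List Char) : List (List (List Char)) :=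
  if !gs.isEmpty && PySem.Chars.islower (ln.headD ' ') then
    gs.dropLast ++ [gs.getLastD [] ++ [ln]]
  else gs ++ [[ln]]
-- a "good" line: non-empty with non-space first and last character
def pvGood (ln : List Char) : Prop :=
  ln ≠ [] ∧ PySem.Chars.isspace (ln.headD ' ') = false ∧ PySem.Chars.isspace (ln.getLastD ' ') = false

lemma pv_getLastD_append (w x : List Char) (h : x ≠ []) (d : Char) :
    (w ++ x).getLastD d = x.getLastD d := by
  induction w with
  | nil => rfl
  | cons a t ih =>
    rcases t with _ | ⟨b, r⟩
    · cases x with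
      | nil => exact absurd rfl h
      | cons y ys => simp [List.getLastD]
    · simpa using ih

lemma pv_headD_append (w x : List Char) (h : w ≠ []) (d : Char) :
    (w ++ x).headD d = w.headD d := by
  cases w with
  | nil => exact absurd rfl h
  | cons a t => rfl

lemma pv_join_concat (sep : List Char) (as : List (List Char)) (b : List Char) :
    PySem.Chars.join sep (as ++ [b]) =
      if as.isEmpty then b else PySem.Chars.join sep as ++ sep ++ b := by
  induction as with
  | nil => simp [PySem.Chars.join_singleton]
  | cons a t ih =>
    cases t with
    | nil => simp [PySem.Chars.join_cons_cons, PySem.Chars.join_singleton]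
    | cons c r =>
      have h1 : (a :: c :: r) ++ [b] = a :: (c :: (r ++ [b])) := by simp
      have h2 : c :: (r ++ [b]) = (c :: r) ++ [b] := by simp
      rw [h1, PySem.Chars.join_cons_cons, h2, ih]
      simp [PySem.Chars.join_cons_cons, List.append_assoc]

-- ''.join(g) is concatenation
lemma pv_join_nil_eq_flatten (parts : List (List Char)) :
    PySem.Chars.join [] parts = parts.flatten := by
  induction parts with
  | nil => simp [PySem.Chars.join_nil]
  | cons a t ih =>
    cases t with
    | nil => simp [PySem.Chars.join_singleton]
    | cons c r => simp [PySem.Chars.join_cons_cons, ← ih]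

-- words produced by split() are non-empty and space-free
lemma pv_go_words : ∀ (s cur : List Char) (acc : List (List Char)),
    (∀ c ∈ cur, PySem.Chars.isspace c = false) →
    (∀ w ∈ acc, w ≠ [] ∧ ∀ c ∈ w, PySem.Chars.isspace c = false) →
    ∀ w ∈ PySem.Chars.split₀.go s cur acc, w ≠ [] ∧ ∀ c ∈ w, PySem.Chars.isspace c = false := by
  intro s
  induction s with
  | nil =>
    intro cur acc hcur hacc w hw
    by_cases hc : cur.isEmpty
    · simp [PySem.Chars.split₀.go, hc] at hw
      exact hacc w hw
    · simp [PySem.Chars.split₀.go, hc] at hw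
      rcases hw with h | h
      · exact hacc w h
      · subst h
        refine ⟨by simpa [List.isEmpty_iff] using hc, ?_⟩
        intro c hc'; exact hcur c (by simpa using hc')
  | cons c rest ih =>
    intro cur acc hcur hacc w hw
    by_cases hs : PySem.Chars.isspace c
    · by_cases hc : cur.isEmpty
      · simp only [PySem.Chars.split₀.go, hs, hc, if_true] at hw
        exact ih [] acc (by simp) hacc w hw
      · simp only [PySem.Chars.split₀.go, hs, hc, if_true, Bool.false_eq_true, if_false] at hw
        refine ih [] (cur.reverse :: acc) (by simp) ?_ w hw
        intro v hv
        rcases List.mem_cons.mp hv with h | h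
        · subst h
          exact ⟨by simpa [List.isEmpty_iff] using hc, fun d hd => hcur d (by simpa using hd)⟩
        · exact hacc v h
    · simp only [PySem.Chars.split₀.go, hs, Bool.false_eq_true, if_false] at hw
      refine ih (c :: cur) acc ?_ hacc w hw
      intro d hd
      rcases List.mem_cons.mp hd with h | h
      · subst h; simpa using hs
      · exact hcur d h

lemma pv_split₀_words (i : List Char) :
    ∀ w ∈ PySem.Chars.split₀ i, w ≠ [] ∧ ∀ c ∈ w, PySem.Chars.isspace c = false :=
  pv_go_words i [] [] (by simp) (by simp)

lemma pv_go_eq_nil : ∀ (s cur : List Char) (acc : List (List Char)),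
    PySem.Chars.split₀.go s cur acc = [] → acc = [] ∧ cur = [] ∧ ∀ c ∈ s, PySem.Chars.isspace c = true := by
  intro s
  induction s with
  | nil =>
    intro cur acc h
    by_cases hc : cur.isEmpty
    · simp [PySem.Chars.split₀.go, hc] at h
      exact ⟨h, by simpa [List.isEmpty_iff] using hc, by simp⟩
    · simp [PySem.Chars.split₀.go, hc] at h
  | cons c rest ih =>
    intro cur acc h
    by_cases hs : PySem.Chars.isspace c
    · by_cases hc : cur.isEmpty
      · simp only [PySem.Chars.split₀.go, hs, hc, if_true] at h
        obtain ⟨h1, h2, h3⟩ := ih [] acc h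
        refine ⟨h1, by simpa [List.isEmpty_iff] using hc, ?_⟩
        intro d hd
        rcases List.mem_cons.mp hd with h4 | h4
        · subst h4; exact hs
        · exact h3 d h4
      · simp only [PySem.Chars.split₀.go, hs, hc, if_true, Bool.false_eq_true, if_false] at h
        obtain ⟨h1, -, -⟩ := ih [] (cur.reverse :: acc) h
        simp at h1
    · simp only [PySem.Chars.split₀.go, hs, Bool.false_eq_true, if_false] at h
      obtain ⟨-, h2, -⟩ := ih (c :: cur) acc h
      simp at h2

lemma pv_split₀_ne_nil (i : List Char) (h : (PySem.Chars.strip i).isEmpty = false) :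
    PySem.Chars.split₀ i ≠ [] := by
  intro hnil
  obtain ⟨-, -, hall⟩ := pv_go_eq_nil i [] [] hnil
  have : PySem.Chars.lstrip i = [] := by
    simp only [PySem.Chars.lstrip, List.dropWhile_eq_nil_iff]
    intro x hx; exact hall x hx
  simp [PySem.Chars.strip, this, PySem.Chars.rstrip] at h

lemma pv_good_join : ∀ (ws : List (List Char)), ws ≠ [] →
    (∀ w ∈ ws, w ≠ [] ∧ ∀ c ∈ w, PySem.Chars.isspace c = false) →
    pvGood (PySem.Chars.join [' '] ws) := by
  intro ws
  induction ws with
  | nil => intro h; exact absurd rfl h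
  | cons w t ih =>
    intro _ hall
    obtain ⟨hw, hwc⟩ := hall w (List.mem_cons_self)
    cases t with
    | nil =>
      rw [PySem.Chars.join_singleton]
      refine ⟨hw, ?_, ?_⟩
      · cases w with
        | nil => exact absurd rfl hw
        | cons c r => exact hwc c (by simp)
      · have hmem := List.getLast_mem hw
        have hx : w.getLastD ' ' = w.getLast hw := by
          rw [List.getLastD_eq_getLast?, List.getLast?_eq_some_getLast hw]; rfl
        rw [hx]; exact hwc _ hmem
    | cons v r =>
      rw [PySem.Chars.join_cons_cons]
      obtain ⟨h1, h2, h3⟩ := ih (by simp) (fun u hu => hall u (List.mem_cons_of_mem _ hu))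
      refine ⟨by simp [hw], ?_, ?_⟩
      · rw [List.append_assoc, pv_headD_append _ _ hw]
        cases w with
        | nil => exact absurd rfl hw
        | cons c rr => exact hwc c (by simp)
      · rw [List.append_assoc, pv_getLastD_append _ _ (by simp), pv_getLastD_append _ _ h1]
        exact h3

lemma pv_norm_good (i : List Char) (h : (PySem.Chars.strip i).isEmpty = false) :
    pvGood (pvNorm i) :=
  pv_good_join _ (pv_split₀_ne_nil i h) (pv_split₀_words i)

-- grouping invariant: the concatenation A builds is the ('\n'-prefixed) rendering of B's groups
lemma pv_groups_spec (L : List (List Char)) (h : L ≠ []) :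
    L.foldl pvStepB [] ≠ [] ∧
    L.flatMap pvStuff =
      (if PySem.Chars.islower ((L.headD []).headD ' ') then [] else ['\n']) ++
        PySem.Chars.join ['\n'] ((L.foldl pvStepB []).map List.flatten) := by
  induction L using List.reverseRecOn with
  | nil => exact absurd rfl h
  | append_singleton L x ih =>
    rcases L with _ | ⟨l0, L'⟩
    · simp only [List.nil_append, List.foldl_cons, List.foldl_nil, pvStepB]
      simp only [List.isEmpty_nil, Bool.not_true, Bool.false_and, if_neg Bool.false_ne_true]
      refine ⟨by simp, ?_⟩
      simp only [List.nil_append, List.flatMap_cons, List.flatMap_nil, List.append_nil,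
        List.headD_cons, List.map_cons, List.map_nil, PySem.Chars.join_singleton,
        List.flatten_cons, List.flatten_nil, pvStuff]
      split_ifs <;> simp
    · set L := l0 :: L' with hL
      obtain ⟨hne, heq⟩ := ih (by simp [hL])
      set gs := L.foldl pvStepB [] with hgs
      have hfold : (L ++ [x]).foldl pvStepB [] = pvStepB gs x := by
        rw [List.foldl_append]; rfl
      have hhead : ((L ++ [x]).headD []) = L.headD [] := by simp [hL]
      have hflat : (L ++ [x]).flatMap pvStuff = L.flatMap pvStuff ++ pvStuff x := by
        rw [List.flatMap_append]; simp
      obtain ⟨ds, g, hdg⟩ : ∃ ds g, gs = ds ++ [g] := by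
        rcases List.eq_nil_or_concat gs with h1 | ⟨ds, g, h1⟩
        · exact absurd h1 hne
        · exact ⟨ds, g, by simpa using h1⟩
      by_cases hlow : PySem.Chars.islower (x.headD ' ') = true
      · have hstep : pvStepB gs x = ds ++ [g ++ [x]] := by
          rw [pvStepB, if_pos (by rw [hdg, hlow]; simp), hdg,
            List.dropLast_concat, List.getLastD_concat]
        refine ⟨by rw [hfold, hstep]; simp, ?_⟩
        rw [hfold, hstep, hflat, heq, hhead, pvStuff, if_pos hlow]
        have e1 : (ds ++ [g ++ [x]]).map List.flatten =
            ds.map List.flatten ++ [g.flatten ++ x] := by simp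
        rw [e1, pv_join_concat, hdg]
        have e2 : (ds ++ [g]).map List.flatten = ds.map List.flatten ++ [g.flatten] := by simp
        rw [e2, pv_join_concat]
        split_ifs <;> simp [List.append_assoc]
      · have hstep : pvStepB gs x = gs ++ [[x]] := by
          rw [pvStepB, if_neg (by rw [Bool.and_eq_true]; rintro ⟨-, hc⟩; exact hlow hc)]
        refine ⟨by rw [hfold, hstep]; simp, ?_⟩
        rw [hfold, hstep, hflat, heq, hhead, pvStuff, if_neg hlow]
        have e1 : (gs ++ [[x]]).map List.flatten = gs.map List.flatten ++ [x ++ []] := by simp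
        rw [e1, pv_join_concat]
        simp [hdg, List.append_assoc]

lemma pv_strip_body (body : List Char) (h : body ≠ [])
    (h1 : PySem.Chars.isspace (body.headD ' ') = false)
    (h2 : PySem.Chars.isspace (body.getLastD ' ') = false) :
    PySem.Chars.strip body = body ∧ PySem.Chars.strip ('\n' :: body) = body := by
  have hl : PySem.Chars.lstrip body = body := by
    cases body with
    | nil => exact absurd rfl h
    | cons c r =>
      simp only [PySem.Chars.lstrip, List.dropWhile_cons]
      simp only [List.headD] at h1
      simp [h1]
  have hb : body = body.dropLast ++ [body.getLastD ' '] := by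
    conv_lhs => rw [← List.dropLast_append_getLast h]
    congr 1
    rw [List.getLastD_eq_getLast?, List.getLast?_eq_some_getLast h]
    rfl
  have hr : PySem.Chars.rstrip body = body := by
    rw [PySem.Chars.rstrip]
    conv_lhs => rw [hb]
    rw [List.reverse_append, List.reverse_singleton, List.singleton_append,
        List.dropWhile_cons, if_neg (by simp only [h2]; exact Bool.false_ne_true)]
    rw [List.reverse_cons, List.reverse_reverse, ← hb]
  refine ⟨by rw [PySem.Chars.strip, hl, hr], ?_⟩
  rw [PySem.Chars.strip]
  have hln : PySem.Chars.lstrip ('\n' :: body) = body := by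
    simp only [PySem.Chars.lstrip, List.dropWhile_cons,
      show PySem.Chars.isspace '\n' = true from rfl, if_true]
    simpa [PySem.Chars.lstrip] using hl
  rw [hln, hr]

lemma pv_flatMap_last (L : List (List Char)) (h : L ≠ [])
    (hgood : ∀ ln ∈ L, pvGood ln) :
    PySem.Chars.isspace ((L.flatMap pvStuff).getLastD ' ') = false := by
  obtain ⟨L', lk, hLk⟩ : ∃ L' lk, L = L' ++ [lk] := by
    rcases List.eq_nil_or_concat L with h1 | ⟨L', lk, h1⟩
    · exact absurd h1 h
    · exact ⟨L', lk, by simpa using h1⟩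
  obtain ⟨hk1, -, hk3⟩ := hgood lk (by simp [hLk])
  have hs : pvStuff lk ≠ [] := by
    rw [pvStuff]; split_ifs <;> simp [hk1]
  rw [hLk, List.flatMap_append]
  have : List.flatMap pvStuff [lk] = pvStuff lk := by simp
  rw [this, pv_getLastD_append _ _ hs, pvStuff]
  split_ifs
  · exact hk3
  · rw [show ('\n' :: lk) = ['\n'] ++ lk from rfl, pv_getLastD_append _ _ hk1]
    exact hk3

-- ===== VERDICT (by name: the statement is the Claim_ definition above) =====
theorem remove_blank_spec : Claim_equal_remove_blank := by
  intro s _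
  unfold Spec_remove_blank remove_blank remove_blank_alt
  set raw := PySem.Chars.splitOn s.toList ['\n'] with hraw
  set fl := raw.filter (fun i => !(PySem.Chars.strip i).isEmpty) with hfl
  set L := fl.map (fun i => PySem.Chars.join [' '] (PySem.Chars.split₀ i)) with hLdef
  have hLnorm : L = fl.map pvNorm := rfl
  -- A's loop builds the flatMap of pvStuff over the normalized kept lines
  have hA : raw.foldl (fun t i =>
      if !(PySem.Chars.strip i).isEmpty then
        let i' := PySem.Chars.join [' '] (PySem.Chars.split₀ i)
        match PySem.List.pyGet? i' 0 with
        | some c => if PySem.Chars.islower c then t ++ i' else t ++ '\n' :: i'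
        | none => t
      else t) [] = L.flatMap pvStuff := by
    rw [PySem.List.foldl_if_eq_foldl_filter, ← hfl]
    rw [PySem.List.foldl_congr_mem fl _ (fun t i => t ++ pvStuff (pvNorm i)) []
      (by
        intro acc i hi
        have hp : (PySem.Chars.strip i).isEmpty = false := by
          have := (List.mem_filter.mp hi).2
          simpa using this
        obtain ⟨c, r, hcr⟩ := List.exists_cons_of_ne_nil (pv_norm_good i hp).1
        show (let i' := PySem.Chars.join [' '] (PySem.Chars.split₀ i)
          match PySem.List.pyGet? i' 0 with
          | some c => if PySem.Chars.islower c then acc ++ i' else acc ++ '\n' :: i'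
          | none => acc) = acc ++ pvStuff (pvNorm i)
        show (match PySem.List.pyGet? (pvNorm i) 0 with
          | some c => if PySem.Chars.islower c then acc ++ pvNorm i else acc ++ '\n' :: pvNorm i
          | none => acc) = acc ++ pvStuff (pvNorm i)
        rw [hcr]
        rw [show PySem.List.pyGet? (c :: r) 0 = some c from by
          simp [PySem.List.pyGet?, PySem.List.pyIdx?]]
        show (if PySem.Chars.islower c then acc ++ c :: r else acc ++ '\n' :: c :: r) =
          acc ++ pvStuff (c :: r)
        rw [pvStuff, List.headD_cons]
        split_ifs <;> rfl)]
    rw [PySem.List.foldl_append_eq_flatMap, hLnorm, List.flatMap_map]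
    rfl
  rw [hA]
  -- B's loop is pvStepB, and ''.join is flatten
  show String.ofList (PySem.Chars.strip (L.flatMap pvStuff)) =
    String.ofList (PySem.Chars.join ['\n']
      ((L.foldl pvStepB []).map (fun g => PySem.Chars.join [] g)))
  have hjoinmap : ∀ gs : List (List (List Char)),
      gs.map (fun g => PySem.Chars.join [] g) = gs.map List.flatten := by
    intro gs; exact List.map_congr_left (fun g _ => pv_join_nil_eq_flatten g)
  rw [hjoinmap]
  rcases hLcases : L with _ | ⟨ln1, rest⟩
  · simp [PySem.Chars.join_nil, PySem.Chars.strip, PySem.Chars.lstrip, PySem.Chars.rstrip]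
  · have hLne : L ≠ [] := by rw [hLcases]; exact List.cons_ne_nil _ _
    have hgood : ∀ ln ∈ L, pvGood ln := by
      intro ln hln
      rw [hLnorm] at hln
      obtain ⟨i, hi, rfl⟩ := List.mem_map.mp hln
      have hp : (PySem.Chars.strip i).isEmpty = false := by
        have := (List.mem_filter.mp hi).2
        simpa using this
      exact pv_norm_good i hp
    obtain ⟨hne, heq⟩ := pv_groups_spec L hLne
    rw [← hLcases]
    set body := PySem.Chars.join ['\n'] ((L.foldl pvStepB []).map List.flatten) with hbody
    obtain ⟨hg1, hg2, hg3⟩ := hgood ln1 (by rw [hLcases]; exact List.mem_cons_self)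
    have hsplit : L.flatMap pvStuff = pvStuff ln1 ++ rest.flatMap pvStuff := by
      rw [hLcases]; simp
    have hstuff1 : pvStuff ln1 =
        (if PySem.Chars.islower (ln1.headD ' ') then ([] : List Char) else ['\n']) ++ ln1 := by
      rw [pvStuff]; split_ifs <;> rfl
    have hheadL : ((L.headD []).headD ' ') = ln1.headD ' ' := by rw [hLcases]; rfl
    have hbodyeq : body = ln1 ++ rest.flatMap pvStuff := by
      have h1 : (if PySem.Chars.islower (ln1.headD ' ') then ([] : List Char) else ['\n']) ++ body =
          (if PySem.Chars.islower (ln1.headD ' ') then ([] : List Char) else ['\n']) ++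
            (ln1 ++ rest.flatMap pvStuff) := by
        rw [← List.append_assoc, ← hstuff1, ← hsplit, heq, hheadL]
      exact List.append_cancel_left h1
    have hbne : body ≠ [] := by
      rw [hbodyeq]; intro hc
      exact hg1 (List.append_eq_nil_iff.mp hc).1
    have hbhead : PySem.Chars.isspace (body.headD ' ') = false := by
      rw [hbodyeq, pv_headD_append _ _ hg1]; exact hg2
    have hblast : PySem.Chars.isspace (body.getLastD ' ') = false := by
      have h1 : (L.flatMap pvStuff).getLastD ' ' = body.getLastD ' ' := by
        rw [heq, pv_getLastD_append _ _ hbne]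
      rw [← h1]; exact pv_flatMap_last L hLne hgood
    obtain ⟨hs1, hs2⟩ := pv_strip_body body hbne hbhead hblast
    rw [heq, hheadL]
    split_ifs
    · rw [List.nil_append, hs1]
    · rw [List.singleton_append, hs2]
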